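-- pv_equiv track=rewrite | github.com/danoscarmike/adventofcode | 2024/day8.py | find_similar_antennas
-- ===== SOURCE A (Python) =====
-- from collections import defaultdict
--
-- def find_similar_antennas(grid):
--     antennas = defaultdict(list)
--     for row in grid:
--         for cell in row:
--             if cell == "." or cell in antennas.keys():
--                 continue
--             else:
--                  antenna_locations = []
--                  for i, line in enumerate(grid):
--                     for j, col in enumerate(line):
--                         if col == cell:
--                             antenna_locations.append((i, j))
--
--             antennas[cell] = antenna_locations
--
--     return antennas
-- ===== SOURCE B (Python) =====
-- def find_similar_antennas(grid):
--     antennas = {}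
--     for i, row in enumerate(grid):
--         for j, cell in enumerate(row):
--             if cell != ".":
--                 antennas.setdefault(cell, []).append((i, j))
--     return antennas
-- ===== Notes on version B (the rewrite author's own statement) =====
-- stated objective: faster
-- what changed: B builds the char->locations dict in a single row-major pass, appending each non-dot cell's coordinates to its char's list, instead of A's rescan of the entire grid for every newly seen character.
import Mathlib
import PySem

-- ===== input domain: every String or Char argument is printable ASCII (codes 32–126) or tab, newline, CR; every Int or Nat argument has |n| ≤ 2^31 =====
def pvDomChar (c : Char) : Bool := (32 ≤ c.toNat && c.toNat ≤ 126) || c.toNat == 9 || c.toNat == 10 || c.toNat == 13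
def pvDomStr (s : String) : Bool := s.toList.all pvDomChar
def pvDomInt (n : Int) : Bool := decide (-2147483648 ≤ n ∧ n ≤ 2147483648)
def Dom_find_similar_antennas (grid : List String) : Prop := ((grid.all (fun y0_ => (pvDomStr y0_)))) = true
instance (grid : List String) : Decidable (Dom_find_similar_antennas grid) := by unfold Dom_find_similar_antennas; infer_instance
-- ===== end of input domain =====

-- ===== PORT A =====
-- B replaces A's rescan-the-whole-grid-per-new-char with one pass appending each non-dot cell to its char's list.
def find_similar_antennas (grid : List String) : List (String × List (Int × Int)) :=
  (grid.foldl (fun antennas row =>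
      row.toList.foldl (fun antennas cell =>
        if String.ofList [cell] == "." || antennas.contains (String.ofList [cell]) then
          antennas
        else
          antennas.insert (String.ofList [cell])
            ((PySem.List.enumerate grid 0).foldl (fun locs p =>
              (PySem.List.enumerate p.2.toList 0).foldl (fun locs q =>
                if q.2 == cell then locs ++ [(p.1, q.1)] else locs) locs) []))
        antennas)
    (PySem.Dict.empty : PySem.Dict String (List (Int × Int)))).items

-- ===== PORT B =====
def find_similar_antennas_alt (grid : List String) : List (String × List (Int × Int)) :=
  ((PySem.List.enumerate grid 0).foldl (fun antennas p =>
      (PySem.List.enumerate p.2.toList 0).foldl (fun antennas q =>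
        if q.2 != '.' then
          antennas.modify (String.ofList [q.2]) [] (fun v => v ++ [(p.1, q.1)])
        else antennas)
        antennas)
    (PySem.Dict.empty : PySem.Dict String (List (Int × Int)))).items

-- ===== PRECONDITION & SPEC =====
def Spec_find_similar_antennas (grid : List String) (out : List (String × List (Int × Int))) : Prop := out = find_similar_antennas_alt grid
instance (grid : List String) (out : List (String × List (Int × Int))) : Decidable (Spec_find_similar_antennas grid out) := by unfold Spec_find_similar_antennas; infer_instance

-- ===== CLAIM (what is proved, stated in full; the proofs are below) =====
def Claim_equal_find_similar_antennas : Prop := ∀ (grid : List String), Dom_find_similar_antennas grid → Spec_find_similar_antennas grid (find_similar_antennas grid)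

-- ===== LEMMAS AND PROOFS =====

-- the grid flattened into (char, (row, col)) triples, in row-major order
def pvCells (grid : List String) : List (Char × Int × Int) :=
  (PySem.List.enumerate grid 0).flatMap (fun p =>
    (PySem.List.enumerate p.2.toList 0).map (fun q => (q.2, p.1, q.1)))

-- all locations of char c in the grid, row-major (what A's inner double loop computes)
def pvLocs (grid : List String) (c : Char) : List (Int × Int) :=
  ((pvCells grid).filter (fun r => r.1 == c)).map (fun r => r.2)

-- A's per-cell step, with the inner double loop replaced by pvLocs
def pvStepA (grid : List String) (d : PySem.Dict String (List (Int × Int))) (c : Char) :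
    PySem.Dict String (List (Int × Int)) :=
  if String.ofList [c] == "." || d.contains (String.ofList [c]) then d
  else d.insert (String.ofList [c]) (pvLocs grid c)

-- first occurrences of non-dot chars not yet in `seen`, in order
def pvNew : List Char → List Char → List Char
  | [], _ => []
  | c :: l, seen => if c = '.' ∨ c ∈ seen then pvNew l seen else c :: pvNew l (c :: seen)

lemma pvStr_inj (c d : Char) : (String.ofList [c] = String.ofList [d]) ↔ c = d := by
  constructor
  · intro h
    have := congrArg String.toList h
    simpa using this
  · intro h; subst h; rfl

lemma pvStr_dot (c : Char) : (String.ofList [c] = ".") ↔ c = '.' :=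
  pvStr_inj c '.'

-- a generic nested fold over enumerate/enumerate is a fold over pvCells
lemma pvCells_fold {γ : Type} (grid : List String) (F : γ → Char × Int × Int → γ) (init : γ) :
    (PySem.List.enumerate grid 0).foldl (fun a p =>
        (PySem.List.enumerate p.2.toList 0).foldl (fun a q => F a (q.2, p.1, q.1)) a) init
      = (pvCells grid).foldl F init := by
  rw [pvCells, List.foldl_flatMap]
  simp [List.foldl_map]

lemma pvLocs_fold (grid : List String) (c : Char) :
    (PySem.List.enumerate grid 0).foldl (fun locs p =>
        (PySem.List.enumerate p.2.toList 0).foldl (fun locs q =>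
          if q.2 == c then locs ++ [(p.1, q.1)] else locs) locs) []
      = pvLocs grid c := by
  have h1 := pvCells_fold grid
    (fun locs (r : Char × Int × Int) => if r.1 == c then locs ++ [r.2] else locs)
    ([] : List (Int × Int))
  have h2 := PySem.List.foldl_append_if
    (fun r : Char × Int × Int => r.1 == c) (fun r : Char × Int × Int => r.2)
    (pvCells grid) ([] : List (Int × Int))
  rw [pvLocs]
  exact h1.trans (h2.trans (by simp))

lemma pvChars_eq (grid : List String) :
    (pvCells grid).map (fun r => r.1) = grid.flatMap (·.toList) := by
  rw [pvCells, List.map_flatMap]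
  conv_rhs => rw [show grid = (PySem.List.enumerate grid 0).map (·.2) from (PySem.List.map_snd_enumerate grid 0).symm]
  rw [List.flatMap_map]
  refine congrArg (List.flatMap · (PySem.List.enumerate grid 0)) (funext fun p => ?_)
  rw [List.map_map]
  exact PySem.List.map_snd_enumerate p.2.toList 0

-- A's accumulated dict: items = old items ++ (first-seen non-dot chars ↦ all their locations)
lemma pvFoldA_items (grid : List String) :
    ∀ (l : List Char) (seen : List Char) (d : PySem.Dict String (List (Int × Int))),
      d.keys.Nodup → (∀ x : Char, String.ofList [x] ∈ d.keys ↔ x ∈ seen) →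
      (l.foldl (pvStepA grid) d).items
        = d.items ++ (pvNew l seen).map (fun c => (String.ofList [c], pvLocs grid c)) := by
  intro l
  induction l with
  | nil => intro seen d _ _; simp [pvNew]
  | cons c l ih =>
    intro seen d hnd hmem
    by_cases hdot : c = '.'
    · subst hdot
      have hstep : pvStepA grid d '.' = d := by simp [pvStepA]
      simp only [List.foldl_cons, hstep, pvNew]
      exact ih seen d hnd hmem
    · by_cases hseen : c ∈ seen
      · have hcont : d.contains (String.ofList [c]) = true :=
          (PySem.Dict.contains_iff_mem_keys d _).mpr ((hmem c).mpr hseen)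
        have hstep : pvStepA grid d c = d := by simp [pvStepA, hcont]
        simp only [List.foldl_cons, hstep, pvNew, if_pos (Or.inr hseen)]
        exact ih seen d hnd hmem
      · have hkey : ¬ String.ofList [c] ∈ d.keys := fun h => hseen ((hmem c).mp h)
        have hcont : d.contains (String.ofList [c]) = false := by
          rw [← Bool.not_eq_true, PySem.Dict.contains_iff_mem_keys]; exact hkey
        have hbeq : (String.ofList [c] == ".") = false := by
          simp [pvStr_dot, hdot]
        have hstep : pvStepA grid d c = d.insert (String.ofList [c]) (pvLocs grid c) := by
          simp [pvStepA, hbeq, hcont]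
        have hkeys := PySem.Dict.keys_insert_of_not_contains d (pvLocs grid c) hcont
        have hnd' : (d.insert (String.ofList [c]) (pvLocs grid c)).keys.Nodup := by
          rw [hkeys, List.nodup_append]
          refine ⟨hnd, List.nodup_singleton _, ?_⟩
          intro a ha b hb
          simp only [List.mem_singleton] at hb
          subst hb
          exact fun he => hkey (he ▸ ha)
        have hmem' : ∀ x : Char,
            String.ofList [x] ∈ (d.insert (String.ofList [c]) (pvLocs grid c)).keys ↔ x ∈ c :: seen := by
          intro x
          rw [hkeys]
          simp [hmem x, pvStr_inj, or_comm]
        simp only [List.foldl_cons, hstep, pvNew, if_neg (not_or.mpr ⟨hdot, hseen⟩)]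
        rw [ih (c :: seen) _ hnd' hmem',
          PySem.Dict.items_insert_of_not_contains d (pvLocs grid c) hcont]
        simp

-- ordered dedup of the non-dot chars = pvNew
lemma pvSetUpdate_eq :
    ∀ (l : List Char) (seen : List Char) (s : List String),
      (∀ x : Char, String.ofList [x] ∈ s ↔ x ∈ seen) →
      PySem.Set.update s ((l.filter (fun c => c != '.')).map (fun c => String.ofList [c]))
        = s ++ (pvNew l seen).map (fun c => String.ofList [c]) := by
  intro l
  induction l with
  | nil => intro seen s _; simp [pvNew, PySem.Set.update]
  | cons c l ih =>
    intro seen s hmem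
    by_cases hdot : c = '.'
    · subst hdot
      simp only [List.filter_cons, show (('.' != '.') = false) from rfl, Bool.false_eq_true,
        if_false, pvNew]
      exact ih seen s hmem
    · have hf : (c != '.') = true := by simp [hdot]
      by_cases hseen : c ∈ seen
      · simp only [List.filter_cons, hf, if_true, List.map_cons, PySem.Set.update_cons,
          PySem.Set.add_of_mem ((hmem c).mpr hseen), pvNew, if_pos (Or.inr hseen)]
        exact ih seen s hmem
      · have hnot : String.ofList [c] ∉ s := fun h => hseen ((hmem c).mp h)
        have hmem' : ∀ x : Char, String.ofList [x] ∈ s ++ [String.ofList [c]] ↔ x ∈ c :: seen := by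
          intro x
          simp [hmem x, pvStr_inj, or_comm]
        simp only [List.filter_cons, hf, if_true, List.map_cons, PySem.Set.update_cons,
          PySem.Set.add_of_not_mem hnot, pvNew, if_neg (not_or.mpr ⟨hdot, hseen⟩)]
        rw [ih (c :: seen) (s ++ [String.ofList [c]]) hmem']
        simp

lemma pvNew_ne_dot : ∀ (l : List Char) (seen : List Char) (c : Char), c ∈ pvNew l seen → c ≠ '.' := by
  intro l
  induction l with
  | nil => intro seen c h; simp [pvNew] at h
  | cons a l ih =>
    intro seen c h
    rw [pvNew] at h
    split at h
    · exact ih _ _ h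
    · rcases List.mem_cons.mp h with h | h
      · subst h; rename_i hcond; intro hc; exact hcond (Or.inl hc)
      · exact ih _ _ h

-- A's result, characterised
lemma pvA_eq (grid : List String) :
    find_similar_antennas grid
      = (pvNew ((pvCells grid).map (fun r => r.1)) []).map
          (fun c => (String.ofList [c], pvLocs grid c)) := by
  have h2 : (fun (antennas : PySem.Dict String (List (Int × Int))) (cell : Char) =>
      if String.ofList [cell] == "." || antennas.contains (String.ofList [cell]) then
        antennas
      else
        antennas.insert (String.ofList [cell])
          ((PySem.List.enumerate grid 0).foldl (fun locs p =>
            (PySem.List.enumerate p.2.toList 0).foldl (fun locs q =>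
              if q.2 == cell then locs ++ [(p.1, q.1)] else locs) locs) []))
      = pvStepA grid := by
    funext d c
    rw [pvStepA, pvLocs_fold]
  unfold find_similar_antennas
  rw [h2, ← List.foldl_flatMap, ← pvChars_eq grid,
    pvFoldA_items grid _ [] _ (by simp) (by simp)]
  simp [PySem.Dict.empty]

-- B's per-cell step on the flattened grid
def pvStepB (d : PySem.Dict String (List (Int × Int))) (r : Char × Int × Int) :
    PySem.Dict String (List (Int × Int)) :=
  if r.1 != '.' then d.modify (String.ofList [r.1]) [] (fun v => v ++ [r.2]) else d

-- the (key, location) pairs B effectively feeds into its dict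
def pvPairs (grid : List String) : List (String × (Int × Int)) :=
  ((pvCells grid).filter (fun r => r.1 != '.')).map (fun r => (String.ofList [r.1], r.2))

lemma pvPairs_filter (grid : List String) (c : Char) (hc : c ≠ '.') :
    ((pvPairs grid).filter (fun p => p.1 == String.ofList [c])).map (fun p => p.2)
      = pvLocs grid c := by
  rw [pvPairs, List.filter_map, List.map_map, pvLocs]
  have hpred : ((fun p : String × (Int × Int) => p.1 == String.ofList [c]) ∘
      (fun r : Char × Int × Int => (String.ofList [r.1], r.2))) = fun r => r.1 == c := by
    funext r
    by_cases h : r.1 = c <;> simp [Function.comp, h, pvStr_inj]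
  rw [hpred, List.filter_filter]
  have hfix : ∀ ps : List (Char × Int × Int),
      ps.filter (fun a => a.1 == c && (a.1 != '.')) = ps.filter (fun r => r.1 == c) :=
    fun ps => List.filter_congr fun r _ => by by_cases h : r.1 = c <;> simp [h, hc]
  rw [hfix]
  rfl

-- B's result, characterised
lemma pvAlt_eq (grid : List String) :
    find_similar_antennas_alt grid
      = (pvNew ((pvCells grid).map (fun r => r.1)) []).map
          (fun c => (String.ofList [c], pvLocs grid c)) := by
  have h1 := pvCells_fold grid pvStepB (PySem.Dict.empty : PySem.Dict String (List (Int × Int)))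
  have h2 : (pvCells grid).foldl pvStepB PySem.Dict.empty
      = (pvPairs grid).foldl (fun d p => d.modify p.1 [] (fun v => v ++ [p.2])) PySem.Dict.empty := by
    rw [pvPairs, List.foldl_map, List.foldl_filter]
    rfl
  have hdict : find_similar_antennas_alt grid
      = ((pvPairs grid).foldl (fun d p => d.modify p.1 [] (fun v => v ++ [p.2]))
          (PySem.Dict.empty : PySem.Dict String (List (Int × Int)))).items := by
    unfold find_similar_antennas_alt
    exact congrArg PySem.Dict.items (h1.trans h2)
  have hnd : ((pvPairs grid).foldl (fun d p => d.modify p.1 [] (fun v => v ++ [p.2]))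
      (PySem.Dict.empty : PySem.Dict String (List (Int × Int)))).keys.Nodup :=
    PySem.Dict.nodup_keys_foldl_modify_key (pvPairs grid) Prod.fst []
      (fun _ p v => v ++ [p.2]) PySem.Dict.empty (by simp)
  have hkeys : ((pvPairs grid).foldl (fun d p => d.modify p.1 [] (fun v => v ++ [p.2]))
      (PySem.Dict.empty : PySem.Dict String (List (Int × Int)))).keys
      = (pvNew ((pvCells grid).map (fun r => r.1)) []).map (fun c => String.ofList [c]) := by
    have hk := PySem.Dict.keys_foldl_modify_key (pvPairs grid) Prod.fst []
      (fun _ p v => v ++ [p.2]) (PySem.Dict.empty : PySem.Dict String (List (Int × Int)))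
    rw [hk]
    have hmap : (pvPairs grid).map Prod.fst
        = ((((pvCells grid).map (fun r => r.1)).filter (fun c => c != '.')).map
            (fun c => String.ofList [c])) := by
      rw [pvPairs, List.map_map, List.filter_map, List.map_map]
      rfl
    rw [hmap]
    have := pvSetUpdate_eq ((pvCells grid).map (fun r => r.1)) [] [] (by simp)
    simpa [PySem.Dict.empty] using this
  have hgetD : ∀ c : String,
      ((pvPairs grid).foldl (fun d p => d.modify p.1 [] (fun v => v ++ [p.2]))
        (PySem.Dict.empty : PySem.Dict String (List (Int × Int)))).getD c []
      = ((pvPairs grid).filter (fun p => p.1 == c)).map (fun p => p.2) := by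
    intro c
    rw [PySem.Dict.getD_foldl_modify_append]
    simp
  rw [hdict, PySem.Dict.items_eq_map_keys _ hnd [], hkeys, List.map_map]
  refine List.map_congr_left fun c hcmem => ?_
  have hc : c ≠ '.' := pvNew_ne_dot _ _ _ hcmem
  simp only [Function.comp]
  rw [hgetD, pvPairs_filter grid c hc]

-- ===== VERDICT (by name: the statement is the Claim_ definition above) =====
theorem find_similar_antennas_spec : Claim_equal_find_similar_antennas := by
  intro grid _
  show find_similar_antennas grid = find_similar_antennas_alt grid
  rw [pvA_eq, pvAlt_eq]
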